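-- pv_equiv track=rewrite | github.com/IbrahimMohamed9/Programming-I | QB before midterm/QB before midterm.py | lill
-- ===== SOURCE A (Python) =====
-- def lill(n):
--     e = 0
--     o = 0
--     t = 0
--     for i in range(1, n + 1):
--         if (i % 2) == 0:
--             e += 1
--         elif (i % 2) == 1:
--             o += 1
--     for j in range(1, e + 1):
--         if (j % 2) == 0:
--             t += (10 * j)
--     return str(t) + "+" + str(o) + "p"
-- ===== SOURCE B (Python) =====
-- def lill(n):
--     if n < 1:
--         return "0+0p"
--     o = (n + 1) // 2
--     m = (n // 2) // 2
--     return str(10 * m * (m + 1)) + "+" + str(o) + "p"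
-- ===== Notes on version B (the rewrite author's own statement) =====
-- stated objective: faster
-- what changed: Replaced both counting/summing loops by closed-form arithmetic: the odd count and even count come from floor division and the scaled even-index sum from a product formula.
import Mathlib
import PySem

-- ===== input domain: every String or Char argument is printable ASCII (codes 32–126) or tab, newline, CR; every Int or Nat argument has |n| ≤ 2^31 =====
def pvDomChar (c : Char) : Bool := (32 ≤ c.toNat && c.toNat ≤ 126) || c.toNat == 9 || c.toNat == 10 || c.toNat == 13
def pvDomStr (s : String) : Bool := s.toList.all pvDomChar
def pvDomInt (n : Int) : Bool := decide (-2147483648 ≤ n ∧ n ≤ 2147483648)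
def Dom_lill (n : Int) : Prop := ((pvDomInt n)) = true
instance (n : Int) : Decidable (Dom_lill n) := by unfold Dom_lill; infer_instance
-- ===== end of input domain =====

-- B replaces A's two O(n) loops by closed-form arithmetic (objective: faster).

-- ===== PORT A =====
-- first loop body: counts evens in .1, odds in .2
def lillStep (s : Int × Int) (i : Int) : Int × Int :=
  if PySem.Int.mod i 2 = 0 then (s.1 + 1, s.2)
  else if PySem.Int.mod i 2 = 1 then (s.1, s.2 + 1)
  else s

-- second loop body: adds 10*j for even j
def lillStep2 (t : Int) (j : Int) : Int :=
  if PySem.Int.mod j 2 = 0 then t + 10 * j else t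

def lill (n : Int) : String :=
  let eo := (PySem.List.pyRange 1 (n + 1) 1).foldl lillStep (0, 0)
  let t := (PySem.List.pyRange 1 (eo.1 + 1) 1).foldl lillStep2 0
  PySem.Int.toStr t ++ "+" ++ PySem.Int.toStr eo.2 ++ "p"

-- ===== PORT B =====
def lill_alt (n : Int) : String :=
  if n < 1 then "0+0p"
  else
    let o := PySem.Int.floordiv (n + 1) 2
    let m := PySem.Int.floordiv (PySem.Int.floordiv n 2) 2
    PySem.Int.toStr (10 * m * (m + 1)) ++ "+" ++ PySem.Int.toStr o ++ "p"

-- ===== PRECONDITION & SPEC =====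
def Spec_lill (n : Int) (out : String) : Prop := out = lill_alt n
instance (n : Int) (out : String) : Decidable (Spec_lill n out) := by unfold Spec_lill; infer_instance

-- ===== CLAIM (what is proved, stated in full; the proofs are below) =====
def Claim_equal_lill : Prop := ∀ (n : Int), Dom_lill n → Spec_lill n (lill n)

-- ===== LEMMAS AND PROOFS =====

-- first loop over 1..k yields (evens, odds) = (k/2, (k+1)/2)
theorem lill_loop1 (k : Nat) :
    (PySem.List.pyRange 1 ((k : Int) + 1) 1).foldl lillStep (0, 0)
      = (((k / 2 : Nat) : Int), (((k + 1) / 2 : Nat) : Int)) := by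
  induction k with
  | zero => simp [PySem.List.pyRange_one_eq_nil]
  | succ k ih =>
    have h : (((k + 1 : Nat) : Int) + 1) = ((k : Int) + 1) + 1 := by push_cast; ring
    rw [h, PySem.List.pyRange_one_succ_right (by omega), List.foldl_append,
        List.foldl_cons, List.foldl_nil, ih]
    simp only [lillStep, PySem.Int.mod_eq_emod_of_pos (show (0:Int) < 2 by norm_num)]
    rcases Nat.even_or_odd k with ⟨m, hm⟩ | ⟨m, hm⟩ <;> subst hm
    · rw [if_neg (by push_cast; omega), if_pos (by push_cast; omega)]
      have hd1 : (m + m) / 2 = m := by omega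
      have hd2 : (m + m + 1) / 2 = m := by omega
      have hd3 : (m + m + 1 + 1) / 2 = m + 1 := by omega
      rw [hd1, hd2, hd3]
      simp only [Prod.mk.injEq]
      constructor <;> push_cast <;> ring
    · rw [if_pos (by push_cast; omega)]
      have hd1 : (2 * m + 1) / 2 = m := by omega
      have hd2 : (2 * m + 1 + 1) / 2 = m + 1 := by omega
      have hd3 : (2 * m + 1 + 1 + 1) / 2 = m + 1 := by omega
      rw [hd1, hd2, hd3]
      simp only [Prod.mk.injEq]
      constructor <;> push_cast <;> ring

-- second loop over 1..e yields 10*m*(m+1) with m = e/2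
theorem lill_loop2 (e : Nat) :
    (PySem.List.pyRange 1 ((e : Int) + 1) 1).foldl lillStep2 0
      = 10 * ((e / 2 : Nat) : Int) * (((e / 2 : Nat) : Int) + 1) := by
  induction e with
  | zero => simp [PySem.List.pyRange_one_eq_nil]
  | succ e ih =>
    have h : (((e + 1 : Nat) : Int) + 1) = ((e : Int) + 1) + 1 := by push_cast; ring
    rw [h, PySem.List.pyRange_one_succ_right (by omega), List.foldl_append,
        List.foldl_cons, List.foldl_nil, ih]
    simp only [lillStep2, PySem.Int.mod_eq_emod_of_pos (show (0:Int) < 2 by norm_num)]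
    rcases Nat.even_or_odd e with ⟨m, hm⟩ | ⟨m, hm⟩ <;> subst hm
    · rw [if_neg (by push_cast; omega)]
      have hd1 : (m + m) / 2 = m := by omega
      have hd2 : (m + m + 1) / 2 = m := by omega
      rw [hd1, hd2]
    · rw [if_pos (by push_cast; omega)]
      have hd1 : (2 * m + 1) / 2 = m := by omega
      have hd2 : (2 * m + 1 + 1) / 2 = m + 1 := by omega
      rw [hd1, hd2]
      push_cast
      ring

-- ===== VERDICT (by name: the statement is the Claim_ definition above) =====
theorem lill_spec : Claim_equal_lill := by
  intro n _
  unfold Spec_lill lill lill_alt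
  by_cases hn : n < 1
  · have h1 : PySem.List.pyRange 1 (n + 1) 1 = [] :=
      PySem.List.pyRange_one_eq_nil (by omega)
    rw [if_pos hn, h1]
    decide
  · have hk : n = ((n.toNat : Nat) : Int) := by omega
    rw [if_neg hn, hk, lill_loop1]
    simp only
    rw [show ((n.toNat / 2 : Nat) : Int) + 1 = (((n.toNat / 2 + 1 : Nat) : Int)) from by push_cast; ring]
    rw [show (((n.toNat / 2 + 1 : Nat) : Int)) = ((n.toNat / 2 : Nat) : Int) + 1 from by push_cast; ring,
        lill_loop2 (n.toNat / 2)]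
    have ho : PySem.Int.floordiv (((n.toNat : Nat) : Int) + 1) 2 = (((n.toNat + 1) / 2 : Nat) : Int) := by
      rw [PySem.Int.floordiv_eq_ediv_of_pos (show (0:Int) < 2 by norm_num)]
      push_cast; omega
    have hm : PySem.Int.floordiv (PySem.Int.floordiv ((n.toNat : Nat) : Int) 2) 2
        = ((n.toNat / 2 / 2 : Nat) : Int) := by
      rw [PySem.Int.floordiv_eq_ediv_of_pos (show (0:Int) < 2 by norm_num),
          PySem.Int.floordiv_eq_ediv_of_pos (show (0:Int) < 2 by norm_num)]
      push_cast; omega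
    rw [ho, hm]
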